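-- pv_equiv track=rewrite | github.com/leonifrazao/RaxyMS-Security-Audit | raxy_project/src/raxy/infrastructure/proxy/manager.py | _check_country_match
-- ===== SOURCE A (Python) =====
-- from typing import Any, Dict, Iterable, Iterator, List, Optional, Tuple, Union
--
-- def _check_country_match(
--     country_info: Dict[str, Any],
--     desired: Optional[str]
-- ) -> bool:
--     """
--     Verifica se informações de país correspondem ao desejado.
--
--     Args:
--         country_info: Dict com country, country_code, country_name
--         desired: País desejado
--
--     Returns:
--         True se há correspondência
--     """
--     if not desired:
--         return True
--
--     desired_norm = desired.strip().casefold()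
--     if not desired_norm:
--         return True
--
--     candidates = [
--         str(country_info.get(k) or "").strip()
--         for k in ("country", "country_code", "country_name")
--         if country_info.get(k)
--     ]
--     candidates = [c for c in candidates if c and c != "-"]
--
--     if not candidates:
--         return False
--
--     for c in candidates:
--         if c.casefold() == desired_norm:
--             return True
--
--     for c in candidates:
--         norm = c.casefold()
--         if desired_norm in norm or norm in desired_norm:
--             return True
--
--     return False
-- ===== SOURCE B (Python) =====
-- def _check_country_match(country_info, desired):
--     """Single pass over the three keys: substring containment subsumes exact
--     equality, so one test per candidate suffices and no lists are built."""
--     if not desired: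
--         return True
--     desired_norm = desired.strip().casefold()
--     if not desired_norm:
--         return True
--     for key in ("country", "country_code", "country_name"):
--         c = str(country_info.get(key) or "").strip()
--         if c and c != "-":
--             cf = c.casefold()
--             if desired_norm in cf or cf in desired_norm:
--                 return True
--     return False
-- ===== Notes on version B (the rewrite author's own statement) =====
-- stated objective: simpler
-- what changed: B drops the two intermediate candidate lists and the two separate scanning loops (exact-match pass, then substring pass) and does one pass directly over the three keys, testing substring containment once per candidate, since exact casefold equality is subsumed by containment and an empty candidate set makes the pass return False anyway.
import Mathlib
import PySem

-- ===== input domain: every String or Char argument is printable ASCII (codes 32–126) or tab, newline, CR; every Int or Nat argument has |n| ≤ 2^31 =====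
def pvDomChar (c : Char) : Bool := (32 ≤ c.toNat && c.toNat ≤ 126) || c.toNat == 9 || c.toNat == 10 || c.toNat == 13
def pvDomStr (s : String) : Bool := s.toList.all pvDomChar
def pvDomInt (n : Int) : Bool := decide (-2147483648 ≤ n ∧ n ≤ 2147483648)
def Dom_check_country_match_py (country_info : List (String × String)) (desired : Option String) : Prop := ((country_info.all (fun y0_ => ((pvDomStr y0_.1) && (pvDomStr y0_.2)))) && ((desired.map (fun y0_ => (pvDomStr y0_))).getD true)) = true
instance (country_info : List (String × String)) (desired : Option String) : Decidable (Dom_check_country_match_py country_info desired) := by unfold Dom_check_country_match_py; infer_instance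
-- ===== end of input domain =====

-- B replaces A's candidate-list construction plus two scanning loops by one pass over the
-- three keys (substring containment subsumes exact equality); objective: simpler.
-- casefold on the ASCII domain is PySem.Str.lower.

-- ===== PORT A =====
def check_country_match_py (country_info : List (String × String)) (desired : Option String) : Bool :=
  match desired with
  | none => true
  | some d =>
    if d = "" then true
    else
      let desired_norm := PySem.Str.lower (PySem.Str.strip d)
      if desired_norm = "" then true
      else
        let ci := PySem.Dict.mk country_info
        -- candidates = [str(ci.get(k) or "").strip() for k in (...) if ci.get(k)]
        let candidates0 :=
          (["country", "country_code", "country_name"] : List String).filterMap (fun k =>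
            match ci.get? k with
            | some v => if v ≠ "" then some (PySem.Str.strip v) else none
            | none => none)
        -- candidates = [c for c in candidates if c and c != "-"]
        let candidates := candidates0.filter (fun c => c ≠ "" && c ≠ "-")
        if candidates = [] then false
        else if candidates.any (fun c => PySem.Str.lower c == desired_norm) then true
        else candidates.any (fun c =>
          PySem.Str.isIn desired_norm (PySem.Str.lower c) ||
            PySem.Str.isIn (PySem.Str.lower c) desired_norm)

-- ===== PORT B =====
def check_country_match_py_alt (country_info : List (String × String)) (desired : Option String) : Bool :=
  match desired with
  | none => true
  | some d =>
    if d = "" then true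
    else
      let desired_norm := PySem.Str.lower (PySem.Str.strip d)
      if desired_norm = "" then true
      else
        let ci := PySem.Dict.mk country_info
        (["country", "country_code", "country_name"] : List String).any (fun key =>
          let c := PySem.Str.strip ((ci.get? key).getD "")
          if c ≠ "" && c ≠ "-" then
            let cf := PySem.Str.lower c
            PySem.Str.isIn desired_norm cf || PySem.Str.isIn cf desired_norm
          else false)

-- ===== PRECONDITION & SPEC =====
def Spec_check_country_match_py (country_info : List (String × String)) (desired : Option String) (out : Bool) : Prop := out = check_country_match_py_alt country_info desired
instance (country_info : List (String × String)) (desired : Option String) (out : Bool) : Decidable (Spec_check_country_match_py country_info desired out) := by unfold Spec_check_country_match_py; infer_instance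

-- ===== CLAIM (what is proved, stated in full; the proofs are below) =====
def Claim_equal_check_country_match_py : Prop := ∀ (country_info : List (String × String)) (desired : Option String), Dom_check_country_match_py country_info desired → Spec_check_country_match_py country_info desired (check_country_match_py country_info desired)

-- ===== LEMMAS AND PROOFS =====

-- the substring test of A's second loop (and of B's single pass)
def pvSubTest (dn c : String) : Bool :=
  PySem.Str.isIn dn (PySem.Str.lower c) || PySem.Str.isIn (PySem.Str.lower c) dn

-- an exact casefold match passes the substring test
theorem pvSubTest_of_eq (dn c : String) (h : (PySem.Str.lower c == dn) = true) :
    pvSubTest dn c = true := by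
  have hc : PySem.Str.lower c = dn := eq_of_beq h
  simp [pvSubTest, hc, PySem.Chars.isIn_iff_infix]

-- A's tail (empty check, exact-match loop, substring loop) collapses to one any-pass
theorem pvTail_eq_any (dn : String) (cs : List String) :
    (if cs = [] then false
     else if cs.any (fun c => PySem.Str.lower c == dn) then true
     else cs.any (pvSubTest dn)) = cs.any (pvSubTest dn) := by
  by_cases hnil : cs = []
  · simp [hnil]
  · simp only [hnil, if_false]
    by_cases heq : cs.any (fun c => PySem.Str.lower c == dn) = true
    · rcases List.any_eq_true.mp heq with ⟨c, hc, he⟩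
      simp only [heq, if_true]
      exact (List.any_eq_true.mpr ⟨c, hc, pvSubTest_of_eq dn c he⟩).symm
    · simp [heq]

-- per key, A's comprehension-then-filter contribution equals B's body
theorem pvKey_eq (dn : String) (o : Option String) :
    (Option.any (fun c => (decide ¬c = "" && decide ¬c = "-") && pvSubTest dn c)
        (match o with
         | some v => if v ≠ "" then some (PySem.Str.strip v) else none
         | none => none)) =
      (let c := PySem.Str.strip (o.getD "")
       if c ≠ "" && c ≠ "-" then pvSubTest dn c else false) := by
  have h0 : PySem.Str.strip "" = "" := by decide
  cases o with
  | none => simp [h0]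
  | some v =>
    by_cases hv : v = ""
    · subst hv; simp [h0]
    · simp only [hv, ne_eq, not_false_eq_true, if_true, Option.any_some, Option.getD_some]
      by_cases h1 : PySem.Str.strip v = "" <;> by_cases h2 : PySem.Str.strip v = "-" <;>
        simp [h1, h2]

-- ===== VERDICT (by name: the statement is the Claim_ definition above) =====
theorem check_country_match_py_spec : Claim_equal_check_country_match_py := by
  intro country_info desired _
  unfold Spec_check_country_match_py check_country_match_py check_country_match_py_alt
  cases desired with
  | none => rfl
  | some d =>
    by_cases hd : d = ""
    · simp [hd]
    · simp only [hd, if_false]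
      by_cases hn : PySem.Str.lower (PySem.Str.strip d) = ""
      · simp [hn]
      · simp only [hn, if_false]
        set dn := PySem.Str.lower (PySem.Str.strip d)
        set ci := PySem.Dict.mk country_info
        rw [show (fun c => PySem.Str.isIn dn (PySem.Str.lower c) ||
              PySem.Str.isIn (PySem.Str.lower c) dn) = pvSubTest dn from rfl]
        rw [pvTail_eq_any]
        rw [List.any_filter, List.any_filterMap]
        congr 1
        funext k
        exact pvKey_eq dn (ci.get? k)
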